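-- pv_equiv track=rewrite | github.com/KazukiNoSuzaku/Leetcode | Python/1691_Maximum_Height_by_Stacking_Cuboids.py | maxHeight
-- ===== SOURCE A (Python) =====
-- def maxHeight(cuboids):
--     """
--     :type cuboids: List[List[int]]
--     :rtype: int
--     """
--     # Sort each cuboid dimensions, then sort all cuboids
--     for c in cuboids:
--         c.sort()
--     cuboids.sort()
--
--     n = len(cuboids)
--     dp = [c[2] for c in cuboids]
--
--     for i in range(1, n):
--         for j in range(i):
--             if cuboids[j][0] <= cuboids[i][0] and cuboids[j][1] <= cuboids[i][1] and cuboids[j][2] <= cuboids[i][2]: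
--                 dp[i] = max(dp[i], dp[j] + cuboids[i][2])
--     return max(dp)
-- ===== SOURCE B (Python) =====
-- def maxHeight(cuboids):
--     # Same two in-place sorts as the original (the argument is mutated identically).
--     for c in cuboids:
--         c.sort()
--     cuboids.sort()
--     # Top-down memoized recursion: best(i) = tallest stack with cuboids[i] on the
--     # bottom-most... computed on demand and cached, instead of filling a dp array
--     # left to right.
--     memo = {}
--     def best(i):
--         if i in memo:
--             return memo[i]
--         below = 0
--         for j in range(i):
--             if cuboids[j][0] <= cuboids[i][0] and cuboids[j][1] <= cuboids[i][1] and cuboids[j][2] <= cuboids[i][2]: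
--                 below = max(below, best(j))
--         memo[i] = below + cuboids[i][2]
--         return memo[i]
--     return max(best(i) for i in range(len(cuboids)))
-- ===== Notes on version B (the rewrite author's own statement) =====
-- stated objective: alternative
-- what changed: Replaced the bottom-up dp array (nested index loops doing repeated in-place dp[i] max-updates) by a top-down memoized recursion best(i) with a dict cache, whose results are demanded lazily by a generator max; the two in-place sorts (and hence the argument mutation) are kept identical.
import Mathlib
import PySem

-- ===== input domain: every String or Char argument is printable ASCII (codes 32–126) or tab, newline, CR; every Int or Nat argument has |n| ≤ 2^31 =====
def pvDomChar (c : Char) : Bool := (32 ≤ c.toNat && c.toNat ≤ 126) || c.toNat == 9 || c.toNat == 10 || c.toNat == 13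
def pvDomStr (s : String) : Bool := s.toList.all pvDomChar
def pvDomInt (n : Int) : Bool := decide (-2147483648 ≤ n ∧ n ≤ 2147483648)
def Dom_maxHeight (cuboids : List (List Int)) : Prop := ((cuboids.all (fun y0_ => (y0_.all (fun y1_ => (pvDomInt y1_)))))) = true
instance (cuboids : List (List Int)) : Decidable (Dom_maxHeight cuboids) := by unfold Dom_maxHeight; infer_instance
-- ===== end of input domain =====

-- B replaces A's bottom-up dp array (nested index loops with in-place max updates) by a top-down
-- memoized recursion best(i) caching results in a dict; same two in-place sorts of the argument
-- as A (equal mutation), return values proved equal.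

-- ===== PORT A =====
-- the stackability test 'cuboids[j][0] <= cuboids[i][0] and …' (identical text in both Pythons)
def pvFits (b c : List Int) : Bool :=
  decide (PySem.List.pyGetD b 0 0 ≤ PySem.List.pyGetD c 0 0) &&
  decide (PySem.List.pyGetD b 1 0 ≤ PySem.List.pyGetD c 1 0) &&
  decide (PySem.List.pyGetD b 2 0 ≤ PySem.List.pyGetD c 2 0)

-- body of A's inner 'for j in range(i)' loop
def pvInner (cs : List (List Int)) (i : Int) (dp : List Int) (j : Int) : List Int :=
  if pvFits (PySem.List.pyGetD cs j []) (PySem.List.pyGetD cs i [])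
  then PySem.List.pySetD dp i
        (max (PySem.List.pyGetD dp i 0)
             (PySem.List.pyGetD dp j 0 + PySem.List.pyGetD (PySem.List.pyGetD cs i []) 2 0))
  else dp

-- body of A's outer 'for i in range(1, n)' loop
def pvOuter (cs : List (List Int)) (dp : List Int) (i : Int) : List Int :=
  (PySem.List.pyRange 0 i).foldl (pvInner cs i) dp

def maxHeight (cuboids : List (List Int)) : Int :=
  let cs := PySem.List.sorted (cuboids.map (fun c => PySem.List.sorted c (fun x => x) false))
              (fun x => x) false
  let dp := cs.map (fun c => PySem.List.pyGetD c 2 0)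
  let dp := (PySem.List.pyRange 1 (cs.length : Int)).foldl (pvOuter cs) dp
  (PySem.List.max? dp (fun x => x)).getD 0   -- max(dp); [] raises in Python, excluded by Pre_

-- ===== PORT B =====
-- B's recursive 'best(i)' with the memo dict threaded through (state of the Python closure);
-- the 'if i in memo' hit returns the cache, the miss runs the 'for j in range(i)' loop (each
-- fitting j triggers a recursive call 'best(j)') and stores below + cuboids[i][2] under i.
def pvBest (cs : List (List Int)) : Nat → PySem.Dict Int Int → Int × PySem.Dict Int Int
  | i, memo =>
    match memo.get? (i : Int) with
    | some v => (v, memo)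
    | none =>
      let p := (List.range i).attach.foldl
        (fun (acc : Int × PySem.Dict Int Int) j =>
          if pvFits (PySem.List.pyGetD cs (j.1 : Int) []) (PySem.List.pyGetD cs (i : Int) [])
          then
            let r := pvBest cs j.1 acc.2
            (max acc.1 r.1, r.2)
          else acc) (0, memo)
      let h := p.1 + PySem.List.pyGetD (PySem.List.pyGetD cs (i : Int) []) 2 0
      (h, p.2.insert (i : Int) h)
  termination_by i _ => i
  decreasing_by exact List.mem_range.mp j.2

def maxHeight_alt (cuboids : List (List Int)) : Int :=
  let cs := PySem.List.sorted (cuboids.map (fun c => PySem.List.sorted c (fun x => x) false))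
              (fun x => x) false
  -- max(best(i) for i in range(n)): the generator's values in order, memo threaded through
  let p := (List.range cs.length).foldl
      (fun (acc : List Int × PySem.Dict Int Int) i =>
        let r := pvBest cs i acc.2
        (acc.1 ++ [r.1], r.2)) ([], PySem.Dict.empty)
  (PySem.List.max? p.1 (fun x => x)).getD 0   -- max(…); [] raises in Python, excluded by Pre_

-- ===== PRECONDITION & SPEC =====
-- Pre_ excludes exactly the inputs where the Python A raises: an empty list (max(dp) is a
-- ValueError) and any cuboid with fewer than 3 entries (c[2] is an IndexError).
def Pre_maxHeight (cuboids : List (List Int)) : Prop :=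
  cuboids ≠ [] ∧ ∀ c ∈ cuboids, 3 ≤ c.length
instance (cuboids : List (List Int)) : Decidable (Pre_maxHeight cuboids) := by
  unfold Pre_maxHeight; infer_instance

def pvWitness_maxHeight : List (List Int) := [[4, 6, 7], [1, 2, 3], [4, 5, 6], [10, 12, 32]]

def Spec_maxHeight (cuboids : List (List Int)) (out : Int) : Prop := out = maxHeight_alt cuboids
instance (cuboids : List (List Int)) (out : Int) : Decidable (Spec_maxHeight cuboids out) := by
  unfold Spec_maxHeight; infer_instance

-- ===== CLAIM (what is proved, stated in full; the proofs are below) =====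
def Claim_equal_maxHeight : Prop := ∀ (cuboids : List (List Int)), Dom_maxHeight cuboids →
  Pre_maxHeight cuboids → Spec_maxHeight cuboids (maxHeight cuboids)

-- ===== LEMMAS AND PROOFS =====

-- the value best(i) computes, as a pure recursion (proof-side specification)
def pvF (cs : List (List Int)) : Nat → Int
  | i =>
    (List.range i).attach.foldl
      (fun a j => if pvFits (PySem.List.pyGetD cs (j.1 : Int) []) (PySem.List.pyGetD cs (i : Int) [])
                  then max a (pvF cs j.1) else a) 0
    + PySem.List.pyGetD (PySem.List.pyGetD cs (i : Int) []) 2 0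
  termination_by i => i
  decreasing_by exact List.mem_range.mp j.2

-- every cached value is correct
def pvInv (cs : List (List Int)) (memo : PySem.Dict Int Int) : Prop :=
  ∀ (k : Nat) (v : Int), memo.get? (k : Int) = some v → v = pvF cs k

theorem pvInv_empty (cs : List (List Int)) : pvInv cs PySem.Dict.empty := by
  intro k v h
  simp [PySem.Dict.empty, PySem.Dict.get?] at h

-- B's memoized recursion computes pvF and preserves the cache invariant
theorem pvBest_correct (cs : List (List Int)) :
    ∀ (i : Nat) (memo : PySem.Dict Int Int), pvInv cs memo →
      (pvBest cs i memo).1 = pvF cs i ∧ pvInv cs (pvBest cs i memo).2 := by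
  intro i
  induction i using Nat.strong_induction_on with
  | _ i ih =>
    intro memo hm
    rw [pvBest]
    cases hg : memo.get? (i : Int) with
    | some v =>
      exact ⟨hm i v hg, hm⟩
    | none =>
      simp only
      have fold : ∀ (js : List {x // x ∈ List.range i}) (a : Int) (m : PySem.Dict Int Int),
          pvInv cs m →
          (js.foldl (fun (acc : Int × PySem.Dict Int Int) j =>
              if pvFits (PySem.List.pyGetD cs (j.1 : Int) []) (PySem.List.pyGetD cs (i : Int) [])
              then
                let r := pvBest cs j.1 acc.2
                (max acc.1 r.1, r.2)
              else acc) (a, m)).1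
            = js.foldl (fun a j =>
                if pvFits (PySem.List.pyGetD cs (j.1 : Int) []) (PySem.List.pyGetD cs (i : Int) [])
                then max a (pvF cs j.1) else a) a
          ∧ pvInv cs (js.foldl (fun (acc : Int × PySem.Dict Int Int) j =>
              if pvFits (PySem.List.pyGetD cs (j.1 : Int) []) (PySem.List.pyGetD cs (i : Int) [])
              then
                let r := pvBest cs j.1 acc.2
                (max acc.1 r.1, r.2)
              else acc) (a, m)).2 := by
        intro js
        induction js with
        | nil => intro a m hm'; exact ⟨rfl, hm'⟩
        | cons j t iht =>
          intro a m hm'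
          simp only [List.foldl_cons]
          by_cases hf : pvFits (PySem.List.pyGetD cs (j.1 : Int) [])
              (PySem.List.pyGetD cs (i : Int) []) = true
          · obtain ⟨hv, hinv⟩ := ih j.1 (List.mem_range.mp j.2) m hm'
            simp only [hf, if_true]
            rw [hv] at *
            exact iht _ _ hinv
          · simp only [hf]
            exact iht a m hm'
      obtain ⟨h1, h2⟩ := fold (List.range i).attach 0 memo hm
      constructor
      · simp only [h1]
        rw [pvF]
      · intro k v hkv
        rw [PySem.Dict.get?_insert] at hkv
        split at hkv
        · rename_i hk
          have : k = i := by exact_mod_cast hk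
          subst this
          rw [Option.some_inj] at hkv
          rw [← hkv, h1, pvF]
        · exact h2 k v hkv

-- the generator loop of B collects [pvF 0, …, pvF (n-1)]
theorem pvVals (cs : List (List Int)) :
    ∀ (ks : List Nat) (acc : List Int) (m : PySem.Dict Int Int), pvInv cs m →
      (ks.foldl (fun (acc : List Int × PySem.Dict Int Int) i =>
          let r := pvBest cs i acc.2
          (acc.1 ++ [r.1], r.2)) (acc, m)).1 = acc ++ ks.map (pvF cs) := by
  intro ks
  induction ks with
  | nil => intro acc m _; simp
  | cons k t iht =>
    intro acc m hm
    obtain ⟨hv, hinv⟩ := pvBest_correct cs k m hm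
    simp only [List.foldl_cons, List.map_cons]
    rw [iht (acc ++ [(pvBest cs k m).1]) _ hinv, hv]
    simp

-- reading / writing an appended list below the appended cell
theorem pyGetD_append_left {α : Type} (d : List α) (x : α) (j : Int) (v : α)
    (h0 : 0 ≤ j) (h : j.toNat < d.length) :
    PySem.List.pyGetD (d ++ [x]) j v = PySem.List.pyGetD d j v := by
  rw [PySem.List.pyGetD_of_nonneg _ _ h0, PySem.List.pyGetD_of_nonneg _ _ h0]
  unfold List.getD
  rw [List.getElem?_append_left h]

theorem pySetD_append_left {α : Type} (d : List α) (x : α) (i : Int) (v : α)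
    (h0 : 0 ≤ i) (h : i.toNat < d.length) :
    PySem.List.pySetD (d ++ [x]) i v = PySem.List.pySetD d i v ++ [x] := by
  rw [PySem.List.pySetD_of_nonneg _ _ h0, PySem.List.pySetD_of_nonneg _ _ h0]
  exact List.set_append_left _ _ h

theorem pyGetD_append_last {α : Type} (d : List α) (x : α) (v : α) :
    PySem.List.pyGetD (d ++ [x]) (d.length : Int) v = x := by
  rw [PySem.List.pyGetD_natCast]
  simp [List.getD]

theorem pySetD_append_last {α : Type} (d : List α) (x : α) (v : α) :
    PySem.List.pySetD (d ++ [x]) (d.length : Int) v = d ++ [v] := by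
  rw [PySem.List.pySetD_natCast]
  simp [List.set_append_right]

theorem pvInner_len (cs : List (List Int)) (i : Int) (dp : List Int) (j : Int) :
    (pvInner cs i dp j).length = dp.length := by
  unfold pvInner; split <;> simp [PySem.List.length_pySetD]

theorem pvOuter_len (cs : List (List Int)) (dp : List Int) (i : Int) :
    (pvOuter cs dp i).length = dp.length := by
  unfold pvOuter
  induction PySem.List.pyRange 0 i generalizing dp with
  | nil => rfl
  | cons j js ih => simp only [List.foldl_cons]; rw [ih, pvInner_len]

-- A's loop bodies for indices below t.length ignore an appended cuboid and an appended dp cell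
theorem pvInner_append (t : List (List Int)) (c : List Int) (i : Int)
    (hi0 : 0 ≤ i) (hin : i.toNat < t.length) (d : List Int) (x : Int) (hd : d.length = t.length)
    (j : Int) (hj0 : 0 ≤ j) (hjn : j.toNat < t.length) :
    pvInner (t ++ [c]) i (d ++ [x]) j = pvInner t i d j ++ [x] := by
  unfold pvInner
  rw [pyGetD_append_left t c j [] hj0 hjn, pyGetD_append_left t c i [] hi0 hin,
      pyGetD_append_left d x i 0 hi0 (hd ▸ hin), pyGetD_append_left d x j 0 hj0 (hd ▸ hjn)]
  split
  · exact pySetD_append_left d x i _ hi0 (hd ▸ hin)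
  · rfl

theorem pvInner_fold_append (t : List (List Int)) (c : List Int) (i : Int)
    (hi0 : 0 ≤ i) (hin : i.toNat < t.length) (js : List Int)
    (hjs : ∀ j ∈ js, 0 ≤ j ∧ j.toNat < t.length) :
    ∀ (d : List Int) (x : Int), d.length = t.length →
      js.foldl (pvInner (t ++ [c]) i) (d ++ [x]) = js.foldl (pvInner t i) d ++ [x] := by
  induction js with
  | nil => intro d x _; rfl
  | cons j js ih =>
    intro d x hd
    obtain ⟨hj0, hjn⟩ := hjs j (by simp)
    simp only [List.foldl_cons]
    rw [pvInner_append t c i hi0 hin d x hd j hj0 hjn]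
    exact ih (fun j hj => hjs j (by simp [hj])) _ x (by rw [pvInner_len, hd])

theorem pvOuter_append (t : List (List Int)) (c : List Int) (i : Int)
    (hi0 : 0 ≤ i) (hin : i.toNat < t.length) (d : List Int) (x : Int) (hd : d.length = t.length) :
    pvOuter (t ++ [c]) (d ++ [x]) i = pvOuter t d i ++ [x] := by
  unfold pvOuter
  refine pvInner_fold_append t c i hi0 hin _ (fun j hj => ?_) d x hd
  rw [PySem.List.mem_pyRange_one] at hj
  refine ⟨hj.1, ?_⟩
  have : j < (t.length : Int) := lt_of_lt_of_le hj.2 (by exact_mod_cast Int.toNat_le.mp hin.le)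
  omega

theorem pvOuter_fold_append (t : List (List Int)) (c : List Int) (is : List Int)
    (his : ∀ i ∈ is, 0 ≤ i ∧ i.toNat < t.length) :
    ∀ (d : List Int) (x : Int), d.length = t.length →
      is.foldl (pvOuter (t ++ [c])) (d ++ [x]) = is.foldl (pvOuter t) d ++ [x] := by
  induction is with
  | nil => intro d x _; rfl
  | cons i is ih =>
    intro d x hd
    obtain ⟨hi0, hin⟩ := his i (by simp)
    simp only [List.foldl_cons]
    rw [pvOuter_append t c i hi0 hin d x hd]
    exact ih (fun i hi => his i (by simp [hi])) _ x (by rw [pvOuter_len, hd])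

-- the last outer iteration only rewrites the last dp cell, as a running max over the prefix
theorem pvInner_fold_last (v : List Int) (cs' : List (List Int)) (js : List Int)
    (hjs : ∀ j ∈ js, 0 ≤ j ∧ j.toNat < v.length)
    (hcs : PySem.List.pyGetD cs' (v.length : Int) [] = cs'.getD v.length []) :
    ∀ (a : Int),
      js.foldl (pvInner cs' (v.length : Int)) (v ++ [a]) =
        v ++ [js.foldl (fun a j =>
          if pvFits (PySem.List.pyGetD cs' j []) (cs'.getD v.length []) then
            max a (PySem.List.pyGetD v j 0 +
              PySem.List.pyGetD (cs'.getD v.length []) 2 0)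
          else a) a] := by
  induction js with
  | nil => intro a; rfl
  | cons j js ih =>
    intro a
    obtain ⟨hj0, hjn⟩ := hjs j (by simp)
    simp only [List.foldl_cons]
    have hstep : pvInner cs' (v.length : Int) (v ++ [a]) j =
        v ++ [if pvFits (PySem.List.pyGetD cs' j []) (cs'.getD v.length []) then
          max a (PySem.List.pyGetD v j 0 + PySem.List.pyGetD (cs'.getD v.length []) 2 0) else a] := by
      unfold pvInner
      rw [hcs, pyGetD_append_last v a 0, pyGetD_append_left v a j 0 hj0 hjn]
      split
      · rw [pySetD_append_last, max_comm]
      · rfl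
    rw [hstep]
    exact ih (fun j hj => hjs j (by simp [hj])) _

-- a running max of shifted values, started at the shift, is the unshifted running max plus it
theorem pvFoldl_max_add {β : Type} (p : β → Bool) (g : β → Int) (h : Int) (l : List β) :
    ∀ (a : Int), l.foldl (fun a j => if p j then max a (g j + h) else a) (a + h) =
      l.foldl (fun a j => if p j then max a (g j) else a) a + h := by
  induction l with
  | nil => intro a; rfl
  | cons j t ih =>
    intro a
    simp only [List.foldl_cons]
    by_cases hp : p j = true
    · simp only [hp, if_true]
      rw [max_add_add_right]
      exact ih _
    · simp only [hp]
      exact ih a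

-- pvF of indices below t.length ignores an appended cuboid
theorem pvF_append (t : List (List Int)) (c : List Int) :
    ∀ (j : Nat), j < t.length → pvF (t ++ [c]) j = pvF t j := by
  intro j
  induction j using Nat.strong_induction_on with
  | _ j ih =>
    intro hj
    rw [pvF, pvF]
    have hgj : PySem.List.pyGetD (t ++ [c]) (j : Int) [] = PySem.List.pyGetD t (j : Int) [] := by
      exact pyGetD_append_left t c (j : Int) [] (by positivity) (by simpa using hj)
    rw [hgj]
    congr 1
    apply PySem.List.foldl_congr_mem'
    intro x hx a
    have hxj : x.1 < j := List.mem_range.mp x.2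
    rw [ih x.1 hxj (hxj.trans hj),
        pyGetD_append_left t c (x.1 : Int) [] (by positivity) (by simpa using hxj.trans hj)]

-- A's dp after the nested loops is exactly [pvF 0, …, pvF (n-1)]
theorem pvMain (cs : List (List Int)) :
    (PySem.List.pyRange 1 (cs.length : Int)).foldl (pvOuter cs)
        (cs.map (fun c => PySem.List.pyGetD c 2 0)) =
      (List.range cs.length).map (pvF cs) := by
  induction cs using List.reverseRecOn with
  | nil => simp [PySem.List.pyRange_one_eq_nil]
  | append_singleton t c ih =>
    have hcast : (((t ++ [c]).length : Nat) : Int) = (t.length : Int) + 1 := by simp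
    have hF : (List.range t.length).map (pvF (t ++ [c])) = (List.range t.length).map (pvF t) := by
      apply List.map_congr_left
      intro j hj
      exact pvF_append t c j (List.mem_range.mp hj)
    have hlast : pvF (t ++ [c]) t.length =
        (PySem.List.pyRange 0 (t.length : Int)).foldl
          (fun a j => if pvFits (PySem.List.pyGetD (t ++ [c]) j [])
              ((t ++ [c]).getD t.length []) then
            max a (PySem.List.pyGetD ((List.range t.length).map (pvF (t ++ [c]))) j 0 +
              PySem.List.pyGetD ((t ++ [c]).getD t.length []) 2 0)
          else a) (PySem.List.pyGetD c 2 0) := by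
      have hgc : PySem.List.pyGetD (t ++ [c]) (t.length : Int) [] = c := pyGetD_append_last t c []
      have hgc' : (t ++ [c]).getD t.length [] = c := by simp [List.getD]
      rw [pvF, hgc, hgc']
      rw [List.foldl_attach
          (f := fun (a : Int) (j : Nat) =>
            if pvFits (PySem.List.pyGetD (t ++ [c]) (j : Int) []) c
            then max a (pvF (t ++ [c]) j) else a)]
      rw [PySem.List.pyRange_zero_natCast, List.foldl_map]
      have h2 := PySem.List.foldl_congr_mem'
        (f := fun (a : Int) (j : Nat) =>
          if pvFits (PySem.List.pyGetD (t ++ [c]) (j : Int) []) c then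
            max a (PySem.List.pyGetD ((List.range t.length).map (pvF (t ++ [c]))) (j : Int) 0 +
              PySem.List.pyGetD c 2 0)
          else a)
        (g := fun (a : Int) (j : Nat) =>
          if pvFits (PySem.List.pyGetD (t ++ [c]) (j : Int) []) c then
            max a (pvF (t ++ [c]) j + PySem.List.pyGetD c 2 0)
          else a)
        (l := List.range t.length) (init := PySem.List.pyGetD c 2 0)
        (fun j hj a => by
          have hjn : j < t.length := List.mem_range.mp hj
          have hget : PySem.List.pyGetD ((List.range t.length).map (pvF (t ++ [c]))) (j : Int) 0 =
              pvF (t ++ [c]) j := by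
            rw [PySem.List.pyGetD_natCast]
            simp [List.getD, hjn]
          simp only [hget])
      rw [h2]
      have h3 := pvFoldl_max_add
          (p := fun (j : Nat) => pvFits (PySem.List.pyGetD (t ++ [c]) (j : Int) []) c)
          (g := fun (j : Nat) => pvF (t ++ [c]) j) (h := PySem.List.pyGetD c 2 0)
          (l := List.range t.length) 0
      rw [zero_add] at h3
      exact h3.symm
    rcases Decidable.em (t = []) with ht | ht
    · subst ht
      simp only [List.nil_append] at hlast ⊢
      rw [show (((([c] : List (List Int)).length : Nat)) : Int) = 1 by simp,
          PySem.List.pyRange_one_eq_nil (le_refl 1)]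
      simp only [PySem.List.pyRange_one_eq_nil (le_refl 0), List.foldl_nil,
        List.length_nil, Nat.cast_zero] at hlast
      simp only [List.foldl_nil, List.length_cons, List.length_nil, List.range_succ,
        List.range_zero, List.nil_append, List.map_cons, List.map_nil]
      rw [show pvF [c] 0 = PySem.List.pyGetD c 2 0 from by rw [← hlast]]
    · have hn : 1 ≤ (t.length : Int) := by
        have : t.length ≠ 0 := fun h => ht (List.length_eq_zero_iff.mp h)
        omega
      have hb1 : ∀ i ∈ PySem.List.pyRange 1 (t.length : Int), 0 ≤ i ∧ i.toNat < t.length := by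
        intro i hi
        rw [PySem.List.mem_pyRange_one] at hi
        omega
      rw [hcast, PySem.List.pyRange_one_succ_right hn, List.foldl_append, List.map_append]
      simp only [List.map_cons, List.map_nil, List.foldl_cons, List.foldl_nil]
      rw [pvOuter_fold_append t c (PySem.List.pyRange 1 (t.length : Int)) hb1
          (t.map (fun c => PySem.List.pyGetD c 2 0)) (PySem.List.pyGetD c 2 0) (by simp),
          ih, hF.symm]
      have hlen : ((List.range t.length).map (pvF (t ++ [c]))).length = t.length := by simp
      unfold pvOuter
      have hb0 : ∀ j ∈ PySem.List.pyRange 0 (t.length : Int),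
          0 ≤ j ∧ j.toNat < ((List.range t.length).map (pvF (t ++ [c]))).length := by
        intro j hj
        rw [PySem.List.mem_pyRange_one] at hj
        rw [hlen]
        omega
      rw [show (t.length : Int) = (((List.range t.length).map (pvF (t ++ [c]))).length : Int) by
        rw [hlen]]
      rw [pvInner_fold_last ((List.range t.length).map (pvF (t ++ [c]))) (t ++ [c])
          (PySem.List.pyRange 0 (((List.range t.length).map (pvF (t ++ [c]))).length : Int))
          (by rw [hlen] at hb0 ⊢; simpa using hb0)
          (by rw [PySem.List.pyGetD_natCast]) (PySem.List.pyGetD c 2 0)]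
      simp only [hlen]
      rw [show (t ++ [c]).length = t.length + 1 from by simp,
          List.range_succ, List.map_append, List.map_cons, List.map_nil]
      rw [hlast]

-- ===== VERDICT (by name: the statement is the Claim_ definition above) =====
theorem maxHeight_spec : Claim_equal_maxHeight := by
  intro cuboids _ _
  simp only [Spec_maxHeight, maxHeight, maxHeight_alt]
  rw [pvMain, pvVals _ _ [] PySem.Dict.empty (pvInv_empty _), List.nil_append]
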